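-- pv_equiv track=rewrite | github.com/shiro-FFFFFF/loan-assistant | test_rag_fixed.py | simple_rerank
-- ===== SOURCE A (Python) =====
-- def simple_rerank(query, chunks, top_k=3):
--     query_words = set(query.lower().split())
--     chunk_scores = []
--
--     for chunk_text, index in chunks:
--         chunk_words = set(chunk_text.lower().split())
--         score = len(query_words.intersection(chunk_words))
--         chunk_scores.append((chunk_text, index, score))
--
--     chunk_scores.sort(key=lambda x: x[2], reverse=True)
--     return [(text, idx) for text, idx, score in chunk_scores[:top_k]]
-- ===== SOURCE B (Python) =====
-- def simple_rerank(query, chunks, top_k=3):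
--     query_words = set(query.lower().split())
--     buckets = {}
--     for chunk_text, index in chunks:
--         score = len(query_words.intersection(set(chunk_text.lower().split())))
--         buckets.setdefault(score, []).append((chunk_text, index))
--     ranked = []
--     for score in sorted(buckets, reverse=True):
--         ranked.extend(buckets[score])
--     return ranked[:top_k]
-- ===== Notes on version B (the rewrite author's own statement) =====
-- stated objective: alternative
-- what changed: Replaces the full stable comparison sort of all scored triples by score-bucketing: chunks are grouped into a dict keyed by score in one pass, then only the distinct scores are sorted descending and the buckets concatenated before slicing top_k.
import Mathlib
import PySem

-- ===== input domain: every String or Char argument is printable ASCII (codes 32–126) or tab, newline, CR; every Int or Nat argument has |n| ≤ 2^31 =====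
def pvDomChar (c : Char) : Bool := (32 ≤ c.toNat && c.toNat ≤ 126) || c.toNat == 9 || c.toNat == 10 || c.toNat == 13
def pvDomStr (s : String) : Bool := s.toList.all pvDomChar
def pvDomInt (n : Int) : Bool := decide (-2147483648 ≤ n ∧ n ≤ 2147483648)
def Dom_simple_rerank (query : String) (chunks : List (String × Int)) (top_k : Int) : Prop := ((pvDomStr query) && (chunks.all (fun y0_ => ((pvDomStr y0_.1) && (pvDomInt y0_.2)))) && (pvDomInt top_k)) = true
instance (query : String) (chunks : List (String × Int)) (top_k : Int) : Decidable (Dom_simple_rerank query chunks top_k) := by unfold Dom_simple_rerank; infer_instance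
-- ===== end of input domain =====

-- B replaces the full stable sort of all scored chunks by score-bucketing (a dict score -> chunks
-- in order), sorting only the distinct scores descending and concatenating the buckets: alternative.

-- ===== PORT A =====
def simple_rerank (query : String) (chunks : List (String × Int)) (top_k : Int) : List (String × Int) :=
  let query_words := PySem.Set.ofList (PySem.Str.split₀ (PySem.Str.lower query))
  let chunk_scores : List (String × Int × Int) :=
    chunks.foldl (fun acc c =>
      let chunk_words := PySem.Set.ofList (PySem.Str.split₀ (PySem.Str.lower c.1))
      let score : Int := ((PySem.Set.inter query_words chunk_words).length : Int)
      acc ++ [(c.1, c.2, score)]) []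
  let ranked := PySem.List.sorted chunk_scores (fun x => x.2.2) true
  (PySem.List.slice ranked none (some top_k)).map (fun t => (t.1, t.2.1))

-- ===== PORT B =====
def simple_rerank_alt (query : String) (chunks : List (String × Int)) (top_k : Int) : List (String × Int) :=
  let query_words := PySem.Set.ofList (PySem.Str.split₀ (PySem.Str.lower query))
  let buckets : PySem.Dict Int (List (String × Int)) :=
    chunks.foldl (fun b c =>
      let score : Int := ((PySem.Set.inter query_words (PySem.Set.ofList (PySem.Str.split₀ (PySem.Str.lower c.1)))).length : Int)
      b.modify score [] (· ++ [(c.1, c.2)])) PySem.Dict.empty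
  let ranked := (PySem.List.sorted buckets.keys (fun s => s) true).foldl
      (fun acc s => acc ++ buckets.getD s []) []
  PySem.List.slice ranked none (some top_k)

-- ===== PRECONDITION & SPEC =====
def Spec_simple_rerank (query : String) (chunks : List (String × Int)) (top_k : Int) (out : List (String × Int)) : Prop := out = simple_rerank_alt query chunks top_k
instance (query : String) (chunks : List (String × Int)) (top_k : Int) (out : List (String × Int)) : Decidable (Spec_simple_rerank query chunks top_k out) := by unfold Spec_simple_rerank; infer_instance

-- ===== CLAIM (what is proved, stated in full; the proofs are below) =====
def Claim_equal_simple_rerank : Prop := ∀ (query : String) (chunks : List (String × Int)) (top_k : Int), Dom_simple_rerank query chunks top_k → Spec_simple_rerank query chunks top_k (simple_rerank query chunks top_k)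

-- ===== LEMMAS AND PROOFS =====

-- insertBy commutes with map when the comparison factors through the mapped key
theorem pv_insertBy_map {α β : Type} (before : β → β → Bool) (g : α → β) (x : α) (acc : List α) :
    PySem.List.insertBy before (g x) (acc.map g)
    = (PySem.List.insertBy (fun a b => before (g a) (g b)) x acc).map g := by
  induction acc with
  | nil => simp [PySem.List.insertBy]
  | cons y ys ih =>
    simp only [List.map_cons, PySem.List.insertBy]
    by_cases h : before (g x) (g y)
    · simp [h]
    · simp [h, ih]

-- a reverse stable sort of a mapped list is the mapped reverse stable sort
theorem pv_sorted_rev_map {α β κ : Type} [LinearOrder κ] (l : List α) (g : α → β) (key : β → κ) :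
    PySem.List.sorted (l.map g) key true
    = (PySem.List.sorted l (fun c => key (g c)) true).map g := by
  rw [PySem.List.sorted_rev_eq_foldl_insertBy, PySem.List.sorted_rev_eq_foldl_insertBy,
    List.foldl_map]
  suffices h : ∀ (acc : List α),
      l.foldl (fun a x => PySem.List.insertBy (fun a b => decide (key b < key a)) (g x) a) (acc.map g)
      = (l.foldl (fun a x => PySem.List.insertBy (fun a b => decide (key (g b) < key (g a))) x a) acc).map g by
    simpa using h []
  intro acc
  induction l generalizing acc with
  | nil => simp
  | cons y ys ih => simp only [List.foldl_cons, pv_insertBy_map, ih]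

theorem pv_insertBy_append_not_before {α : Type} (before : α → α → Bool) (x : α) (B L : List α)
    (h : ∀ y ∈ B, before x y = false) :
    PySem.List.insertBy before x (B ++ L) = B ++ PySem.List.insertBy before x L := by
  induction B with
  | nil => simp
  | cons b bs ih =>
    have hb : before x b = false := h b (by simp)
    simp only [List.cons_append, PySem.List.insertBy, hb]
    simp only [Bool.false_eq_true, if_false, List.cons.injEq, true_and]
    exact ih (fun y hy => h y (by simp [hy]))

theorem pv_insertBy_forall_before {α : Type} (before : α → α → Bool) (x : α) (L : List α)
    (h : ∀ y ∈ L, before x y = true) :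
    PySem.List.insertBy before x L = x :: L := by
  cases L with
  | nil => rfl
  | cons y ys => simp [PySem.List.insertBy, h y (by simp)]

-- every element of a descending-bucket flatten has its key in the score list
theorem pv_key_of_mem_flatten {α : Type} (f : α → Int) (S : List Int) (xs : List α) (y : α)
    (hy : y ∈ S.flatMap (fun s => xs.filter (fun z => f z == s))) : f y ∈ S := by
  simp only [List.mem_flatMap, List.mem_filter] at hy
  obtain ⟨s, hs, _, he⟩ := hy
  simpa [eq_of_beq he] using hs

-- inserting an element whose score already has a bucket appends it to that bucket
theorem pv_insert_flat_mem {α : Type} (f : α → Int) (S : List Int) (xs : List α) (x : α)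
    (hS : S.Pairwise (· > ·)) (hk : f x ∈ S) :
    PySem.List.insertBy (fun a b => decide (f b < f a)) x
        (S.flatMap (fun s => xs.filter (fun y => f y == s)))
    = S.flatMap (fun s => (xs ++ [x]).filter (fun y => f y == s)) := by
  induction S with
  | nil => simp at hk
  | cons s S' ih =>
    have hpair := (List.pairwise_cons.mp hS).1
    have hS' := (List.pairwise_cons.mp hS).2
    simp only [List.flatMap_cons]
    rcases List.mem_cons.mp hk with hks | hks
    · -- f x = s : append x at the end of the head bucket
      rw [pv_insertBy_append_not_before _ _ _ _ (by
        intro y hy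
        have : f y = s := eq_of_beq (List.mem_filter.mp hy).2
        simp [this, hks])]
      rw [pv_insertBy_forall_before _ _ _ (by
        intro y hy
        have hys := pv_key_of_mem_flatten f S' xs y hy
        have : f y < f x := by rw [hks]; exact hpair _ hys
        simpa using this)]
      have hrest : ∀ s' ∈ S', (xs ++ [x]).filter (fun y => f y == s') = xs.filter (fun y => f y == s') := by
        intro s' hs'
        have : f x ≠ s' := by rw [hks]; exact ne_of_gt (hpair _ hs')
        simp [List.filter_append, this]
      rw [List.filter_append]
      have hx1 : (List.filter (fun y => f y == s) [x]) = [x] := by simp [hks]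
      rw [hx1, List.flatMap_congr (fun s' hs' => hrest s' hs')]
      simp
    · -- f x ∈ S' : skip the head bucket
      have hxlt : f x < s := hpair _ hks
      rw [pv_insertBy_append_not_before _ _ _ _ (by
        intro y hy
        have hys : f y = s := eq_of_beq (List.mem_filter.mp hy).2
        simp [hys]; omega)]
      rw [ih hS' hks]
      have hhead : (xs ++ [x]).filter (fun y => f y == s) = xs.filter (fun y => f y == s) := by
        have : f x ≠ s := by omega
        simp [List.filter_append, this]
      rw [hhead]

-- inserting an element with a fresh score inserts a new singleton bucket at the right place
theorem pv_insert_flat_not_mem {α : Type} (f : α → Int) (S : List Int) (xs : List α) (x : α)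
    (hS : S.Pairwise (· > ·)) (hk : f x ∉ S) (hfresh : xs.filter (fun y => f y == f x) = []) :
    PySem.List.insertBy (fun a b => decide (f b < f a)) x
        (S.flatMap (fun s => xs.filter (fun y => f y == s)))
    = (PySem.List.insertBy (fun a b : Int => decide (b < a)) (f x) S).flatMap
        (fun s => (xs ++ [x]).filter (fun y => f y == s)) := by
  induction S with
  | nil => simp [PySem.List.insertBy, List.filter_append, hfresh]
  | cons s S' ih =>
    have hpair := (List.pairwise_cons.mp hS).1
    have hS' := (List.pairwise_cons.mp hS).2
    have hne : f x ≠ s := fun h => hk (by simp [h])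
    have hrest : ∀ s' ∈ s :: S', (xs ++ [x]).filter (fun y => f y == s') = xs.filter (fun y => f y == s') := by
      intro s' hs'
      have : f x ≠ s' := by
        rcases List.mem_cons.mp hs' with h | h
        · exact fun hc => hk (by simp [hc, h])
        · exact fun hc => hk (by rw [hc]; exact List.mem_cons_of_mem _ h)
      simp [List.filter_append, this]
    by_cases hlt : s < f x
    · -- new maximal bucket in front
      simp only [List.flatMap_cons]
      rw [pv_insertBy_forall_before _ _ _ (by
        intro y hy
        have hys : f y ∈ s :: S' := by
          rcases List.mem_append.mp hy with h | h
          · exact List.mem_cons.mpr (Or.inl (eq_of_beq (List.mem_filter.mp h).2))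
          · exact List.mem_cons_of_mem _ (pv_key_of_mem_flatten f S' xs y h)
        have : f y < f x := by
          rcases List.mem_cons.mp hys with h | h
          · omega
          · have := hpair _ h; omega
        simpa using this)]
      have hins : PySem.List.insertBy (fun a b : Int => decide (b < a)) (f x) (s :: S') = f x :: s :: S' := by
        simp [PySem.List.insertBy, hlt]
      rw [hins]
      simp only [List.flatMap_cons]
      rw [List.filter_append, hfresh]
      simp only [List.nil_append]
      have hx1 : (List.filter (fun y => f y == f x) [x]) = [x] := by simp
      rw [hx1, hrest s List.mem_cons_self,
        List.flatMap_congr (fun s' hs' => hrest s' (List.mem_cons_of_mem _ hs'))]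
      simp
    · -- f x < s : keep the head bucket, recurse
      have hgt : f x < s := by omega
      have hins : PySem.List.insertBy (fun a b : Int => decide (b < a)) (f x) (s :: S')
          = s :: PySem.List.insertBy (fun a b : Int => decide (b < a)) (f x) S' := by
        simp [PySem.List.insertBy, hlt]
      rw [hins]
      simp only [List.flatMap_cons]
      rw [pv_insertBy_append_not_before _ _ _ _ (by
        intro y hy
        have hys : f y = s := eq_of_beq (List.mem_filter.mp hy).2
        simp [hys]; omega)]
      rw [ih hS' (fun h => hk (List.mem_cons_of_mem _ h))]
      rw [hrest s List.mem_cons_self]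

-- sorted of the distinct scores descending is strictly descending
theorem pv_sortedScores_pairwise (K : List Int) (hnd : K.Nodup) :
    (PySem.List.sorted K (fun s => s) true).Pairwise (· > ·) := by
  have h1 : (PySem.List.sorted K (fun s => s) true).Pairwise (fun a b : Int => b ≤ a) :=
    PySem.List.sorted_pairwise_rev K (fun s => s)
  have h2 : (PySem.List.sorted K (fun s => s) true).Nodup :=
    (PySem.List.sorted_perm K (fun s => s) true).nodup_iff.mpr hnd
  exact (h1.and h2).imp (fun h => lt_of_le_of_ne h.1 (Ne.symm h.2))

-- MAIN LEMMA: Python's stable reverse sort by score equals the descending-bucket flatten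
theorem pv_sorted_rev_buckets {α : Type} (xs : List α) (f : α → Int) :
    PySem.List.sorted xs f true
    = (PySem.List.sorted (PySem.Set.ofList (xs.map f)) (fun s => s) true).flatMap
        (fun s => xs.filter (fun y => f y == s)) := by
  induction xs using List.reverseRecOn with
  | nil => simp [PySem.List.sorted]
  | append_singleton l x ih =>
    have hstep : PySem.List.sorted (l ++ [x]) f true
        = PySem.List.insertBy (fun a b => decide (f b < f a)) x (PySem.List.sorted l f true) := by
      rw [PySem.List.sorted_rev_eq_foldl_insertBy, PySem.List.sorted_rev_eq_foldl_insertBy,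
        List.foldl_append]
      rfl
    have hset : PySem.Set.ofList ((l ++ [x]).map f)
        = PySem.Set.add (PySem.Set.ofList (l.map f)) (f x) := by
      rw [List.map_append, PySem.Set.ofList_eq_foldl, PySem.Set.ofList_eq_foldl, List.foldl_append]
      rfl
    have hpair := pv_sortedScores_pairwise (PySem.Set.ofList (l.map f)) (PySem.Set.nodup_ofList _)
    by_cases hmem : f x ∈ PySem.Set.ofList (l.map f)
    · have hadd : PySem.Set.add (PySem.Set.ofList (l.map f)) (f x) = PySem.Set.ofList (l.map f) := by
        simp only [PySem.Set.add]
        rw [if_pos]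
        simpa [PySem.Set.contains] using hmem
      rw [hstep, ih, hset, hadd,
        pv_insert_flat_mem f _ l x hpair (by rw [PySem.List.mem_sorted]; exact hmem)]
    · have hadd : PySem.Set.add (PySem.Set.ofList (l.map f)) (f x) = PySem.Set.ofList (l.map f) ++ [f x] := by
        simp only [PySem.Set.add]
        rw [if_neg]
        simp only [PySem.Set.contains]
        simpa using hmem
      have hsortapp : PySem.List.sorted (PySem.Set.ofList (l.map f) ++ [f x]) (fun s => s) true
          = PySem.List.insertBy (fun a b : Int => decide (b < a)) (f x)
              (PySem.List.sorted (PySem.Set.ofList (l.map f)) (fun s => s) true) := by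
        rw [PySem.List.sorted_rev_eq_foldl_insertBy, PySem.List.sorted_rev_eq_foldl_insertBy,
          List.foldl_append]
        rfl
      have hfresh : l.filter (fun y => f y == f x) = [] := by
        rw [List.filter_eq_nil_iff]
        intro y hy hbe
        exact hmem (by rw [PySem.Set.mem_ofList, List.mem_map]; exact ⟨y, hy, (eq_of_beq hbe)⟩)
      rw [hstep, ih, hset, hadd, hsortapp,
        pv_insert_flat_not_mem f _ l x hpair (by rw [PySem.List.mem_sorted]; exact hmem) hfresh]

-- slicing commutes with map
theorem pv_slice_map {α β : Type} (l : List α) (h : α → β) (b : Int) :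
    PySem.List.slice (l.map h) none (some b) = (PySem.List.slice l none (some b)).map h := by
  simp [PySem.List.slice, List.length_map, List.map_take]

-- the two ports agree, for an arbitrary scoring function
theorem pv_main (f : String × Int → Int) (chunks : List (String × Int)) (top_k : Int) :
    (PySem.List.slice
        (PySem.List.sorted (chunks.foldl (fun acc c => acc ++ [(c.1, c.2, f c)]) []) (fun x => x.2.2) true)
        none (some top_k)).map (fun t => (t.1, t.2.1))
    = PySem.List.slice
        ((PySem.List.sorted
            (chunks.foldl (fun b c => b.modify (f c) [] (· ++ [(c.1, c.2)]))
              (PySem.Dict.empty : PySem.Dict Int (List (String × Int)))).keys (fun s => s) true).foldl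
          (fun acc s => acc ++ (chunks.foldl (fun b c => b.modify (f c) [] (· ++ [(c.1, c.2)]))
              (PySem.Dict.empty : PySem.Dict Int (List (String × Int)))).getD s []) [])
        none (some top_k) := by
  set B := chunks.foldl (fun b c => b.modify (f c) [] (· ++ [(c.1, c.2)]))
    (PySem.Dict.empty : PySem.Dict Int (List (String × Int))) with hBdef
  -- A side: the scoring loop is a map; the sort and the slice commute with the map
  rw [PySem.List.foldl_append_singleton_eq_map, List.nil_append,
    pv_sorted_rev_map chunks (fun c => (c.1, c.2, f c)) (fun x => x.2.2),
    pv_slice_map, List.map_map]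
  have hproj : ((fun t : String × Int × Int => (t.1, t.2.1)) ∘ fun c : String × Int => (c.1, c.2, f c))
      = id := by
    funext c; rfl
  rw [hproj, List.map_id]
  -- B side: the bucket dict's keys are the distinct scores, each lookup a filter of the chunks
  have hB : B = (chunks.map (fun c => (f c, (c.1, c.2)))).foldl
      (fun d p => d.modify p.1 [] (· ++ [p.2])) PySem.Dict.empty := by
    rw [List.foldl_map]
  have hkeys : B.keys = PySem.Set.update
      (PySem.Dict.empty : PySem.Dict Int (List (String × Int))).keys (chunks.map f) :=
    PySem.Dict.keys_foldl_modify_key chunks f [] (fun _ c _v => _v ++ [(c.1, c.2)]) PySem.Dict.empty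
  have hupd : PySem.Set.update
      (PySem.Dict.empty : PySem.Dict Int (List (String × Int))).keys (chunks.map f)
      = PySem.Set.ofList (chunks.map f) := by
    rw [PySem.Set.ofList_eq_foldl]; rfl
  have hbucket : ∀ s : Int, B.getD s [] = (chunks.filter (fun c => f c == s)).map (fun c => (c.1, c.2)) := by
    intro s
    rw [hB, PySem.Dict.getD_foldl_modify_append]
    simp [List.filter_map, Function.comp_def]
  rw [hkeys, hupd, PySem.List.foldl_append_eq_flatMap, List.nil_append]
  simp only [hbucket]
  -- both sides are the descending-bucket flatten, sliced
  rw [pv_sorted_rev_buckets chunks f]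
  have hmap : (fun s : Int => (chunks.filter (fun c => f c == s)).map (fun c => (c.1, c.2)))
      = fun s : Int => chunks.filter (fun y => f y == s) := by
    funext s; simp
  rw [hmap]

-- ===== VERDICT (by name: the statement is the Claim_ definition above) =====
theorem simple_rerank_spec : Claim_equal_simple_rerank := by
  intro query chunks top_k _
  unfold Spec_simple_rerank simple_rerank simple_rerank_alt
  exact pv_main (fun c =>
    ((PySem.Set.inter (PySem.Set.ofList (PySem.Str.split₀ (PySem.Str.lower query)))
        (PySem.Set.ofList (PySem.Str.split₀ (PySem.Str.lower c.1)))).length : Int)) chunks top_k
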